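-- pv_equiv track=rewrite | github.com/Shirishaade/Text-Summarization | definitions.py | sentence_rank
-- ===== SOURCE A (Python) =====
-- def sentence_rank(sentences_list, freq_dict):
--     rank = {}
--     for s in sentences_list:
--         for word, fre in freq_dict.items():
--             if word in s.lower():
--                 if s in rank:
--                     rank[s] += fre
--                 else:
--                     rank[s] = fre
--     return rank
-- ===== SOURCE B (Python) =====
-- def sentence_rank(sentences_list, freq_dict):
--     # Stage 1: deduplicate sentences, remembering multiplicity and first-seen order.
--     counts = {}
--     for s in sentences_list:
--         counts[s] = counts.get(s, 0) + 1
--     # Stage 2: for each distinct sentence build a substring index (all substrings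
--     # whose length is the length of some dictionary word), then score every word
--     # by one hash lookup instead of a substring scan.
--     lengths = set(len(w) for w in freq_dict)
--     rank = {}
--     for s in counts:
--         low = s.lower()
--         grams = set()
--         for L in lengths:
--             for i in range(len(low) - L + 1):
--                 grams.add(low[i:i + L])
--         total = 0
--         hit = False
--         for word, fre in freq_dict.items():
--             if word in grams:
--                 total += fre
--                 hit = True
--         if hit:
--             rank[s] = total * counts[s]
--     return rank
-- ===== Notes on version B (the rewrite author's own statement) =====
-- stated objective: alternative
-- what changed: B first deduplicates sentences into a multiplicity counter, then for each distinct sentence builds a substring index (the set of all its substrings whose length is a dictionary-word length) so every word is scored by one set lookup instead of a substring scan, and writes each sentence's total (times its multiplicity) once.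
import Mathlib
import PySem

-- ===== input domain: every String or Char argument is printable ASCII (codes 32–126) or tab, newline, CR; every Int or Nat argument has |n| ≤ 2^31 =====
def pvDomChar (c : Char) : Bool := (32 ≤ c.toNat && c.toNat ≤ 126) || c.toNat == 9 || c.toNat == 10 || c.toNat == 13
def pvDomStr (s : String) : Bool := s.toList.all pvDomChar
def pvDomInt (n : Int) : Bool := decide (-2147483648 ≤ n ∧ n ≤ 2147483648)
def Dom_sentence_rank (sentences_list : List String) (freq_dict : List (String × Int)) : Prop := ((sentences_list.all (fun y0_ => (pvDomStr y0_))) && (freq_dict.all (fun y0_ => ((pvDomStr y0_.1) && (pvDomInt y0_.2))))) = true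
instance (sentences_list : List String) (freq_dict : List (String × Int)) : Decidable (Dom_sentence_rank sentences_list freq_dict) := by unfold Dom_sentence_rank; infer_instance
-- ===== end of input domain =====

-- B deduplicates sentences into a multiplicity counter and scores each distinct sentence once
-- via a precomputed substring index (set of all substrings of dictionary-word lengths), one set
-- lookup per word, writing total * multiplicity in one dict update (objective: alternative).


-- ===== PORT A =====
def sentence_rank (sentences_list : List String) (freq_dict : List (String × Int)) : List (String × Int) :=
  (sentences_list.foldl (fun rank s =>
    freq_dict.foldl (fun rank wf =>
      if PySem.Str.isIn wf.1 (PySem.Str.lower s) then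
        if rank.contains s then rank.modify s 0 (· + wf.2)
        else rank.insert s wf.2
      else rank) rank)
    (PySem.Dict.empty : PySem.Dict String Int)).items

-- ===== PORT B =====
def sentence_rank_alt (sentences_list : List String) (freq_dict : List (String × Int)) : List (String × Int) :=
  -- counts = {}; for s in sentences_list: counts[s] = counts.get(s, 0) + 1
  let counts : PySem.Dict String Int :=
    sentences_list.foldl (fun d s => d.insert s (d.getD s 0 + 1)) PySem.Dict.empty
  -- lengths = set(len(w) for w in freq_dict)
  let lengths : PySem.Set Int := PySem.Set.ofList (freq_dict.map (fun wf => PySem.Str.len wf.1))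
  -- rank = {}; for s in counts: ...
  let rank : PySem.Dict String Int :=
    counts.keys.foldl (fun rank s =>
      let low := PySem.Str.lower s
      -- grams = set(); for L in lengths: for i in range(len(low) - L + 1): grams.add(low[i:i+L])
      let grams : PySem.Set String :=
        lengths.foldl (fun g L =>
          (PySem.List.pyRange 0 (PySem.Str.len low - L + 1) 1).foldl
            (fun g i => PySem.Set.add g (PySem.Str.slice low (some i) (some (i + L)))) g)
          PySem.Set.empty
      -- total = 0; hit = False; for word, fre in freq_dict.items(): if word in grams: ...
      let th := freq_dict.foldl (fun (p : Int × Bool) wf =>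
        if PySem.Set.contains grams wf.1 then (p.1 + wf.2, true) else p) (0, false)
      if th.2 then rank.insert s (th.1 * counts.getD s 0) else rank)
      PySem.Dict.empty
  rank.items

-- ===== PRECONDITION & SPEC =====
def Spec_sentence_rank (sentences_list : List String) (freq_dict : List (String × Int)) (out : List (String × Int)) : Prop := out = sentence_rank_alt sentences_list freq_dict
instance (sentences_list : List String) (freq_dict : List (String × Int)) (out : List (String × Int)) : Decidable (Spec_sentence_rank sentences_list freq_dict out) := by unfold Spec_sentence_rank; infer_instance

-- ===== CLAIM (what is proved, stated in full; the proofs are below) =====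
def Claim_equal_sentence_rank : Prop := ∀ (sentences_list : List String) (freq_dict : List (String × Int)), Dom_sentence_rank sentences_list freq_dict → Spec_sentence_rank sentences_list freq_dict (sentence_rank sentences_list freq_dict)

-- ===== LEMMAS AND PROOFS =====

-- total frequency of the dictionary words occurring in `low`
def pvTot (low : String) : List (String × Int) → Int
  | [] => 0
  | wf :: rest => (if PySem.Str.isIn wf.1 low then wf.2 else 0) + pvTot low rest

-- does any dictionary word occur in `low`?
def pvHit (low : String) : List (String × Int) → Bool
  | [] => false
  | wf :: rest => PySem.Str.isIn wf.1 low || pvHit low rest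

-- if no word of ws matches, their matched total is 0
lemma pvTot_zero_of_not_hit (low : String) (ws : List (String × Int))
    (h : pvHit low ws = false) : pvTot low ws = 0 := by
  induction ws with
  | nil => rfl
  | cons wf rest ih =>
    simp only [pvHit, Bool.or_eq_false_iff] at h
    simp only [pvTot, h.1, if_false, Bool.false_eq_true]
    rw [ih h.2]
    omega

-- A's inner word loop is one combined dict update
lemma innerA_eq (s : String) (ws : List (String × Int)) (d : PySem.Dict String Int) :
    ws.foldl (fun rank wf =>
      if PySem.Str.isIn wf.1 (PySem.Str.lower s) then
        if rank.contains s then rank.modify s 0 (· + wf.2)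
        else rank.insert s wf.2
      else rank) d
      = if pvHit (PySem.Str.lower s) ws then
          d.insert s (d.getD s 0 + pvTot (PySem.Str.lower s) ws)

        else d := by
  induction ws generalizing d with
  | nil => simp [pvHit]
  | cons wf rest ih =>
    rw [List.foldl_cons]
    by_cases h : PySem.Str.isIn wf.1 (PySem.Str.lower s)
    · have hstep : (if d.contains s then d.modify s 0 (· + wf.2) else d.insert s wf.2)
          = d.insert s (d.getD s 0 + wf.2) := by
        by_cases hc : d.contains s
        · simp [PySem.Dict.modify, hc]
        · rw [if_neg hc,
            PySem.Dict.getD_of_not_contains d 0 (by simpa using hc), zero_add]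
      rw [if_pos h, hstep, ih]
      simp only [pvHit, pvTot, h, if_pos, Bool.true_or]
      by_cases hr : pvHit (PySem.Str.lower s) rest
      · rw [if_pos hr, PySem.Dict.getD_insert_self, PySem.Dict.insert_insert_self,
          add_assoc]
      · rw [if_neg hr]
        simp only [Bool.not_eq_true] at hr
        simp [pvTot_zero_of_not_hit _ _ hr]
    · rw [if_neg h, ih]
      simp only [pvHit, pvTot, Bool.not_eq_true] at h ⊢
      rw [h]
      simp

-- closed form for A's outer fold, as an items list
lemma foldA_items (freq : List (String × Int)) (xs : List String) :
    (xs.foldl (fun d s =>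
        if pvHit (PySem.Str.lower s) freq then
          d.insert s (d.getD s 0 + pvTot (PySem.Str.lower s) freq)
        else d) (PySem.Dict.empty : PySem.Dict String Int)).items
      = ((PySem.Set.ofList xs).filter (fun s => pvHit (PySem.Str.lower s) freq)).map
          (fun s => (s, (xs.count s : Int) * pvTot (PySem.Str.lower s) freq)) := by
  induction xs using List.reverseRecOn with
  | nil => simp [PySem.Dict.empty, PySem.Set.ofList]
  | append_singleton xs x ih =>
    rw [List.foldl_append, List.foldl_cons, List.foldl_nil]
    set hit : String → Bool := fun s => pvHit (PySem.Str.lower s) freq with hhit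
    set tot : String → Int := fun s => pvTot (PySem.Str.lower s) freq with htot
    set D := xs.foldl (fun d s =>
        if hit s then d.insert s (d.getD s 0 + tot s) else d)
        (PySem.Dict.empty : PySem.Dict String Int) with hD
    set L := (PySem.Set.ofList xs).filter hit with hL
    have memL : ∀ s, s ∈ L ↔ s ∈ xs ∧ hit s = true := by
      intro s
      simp [hL, PySem.Set.mem_ofList]
    have nodupL : L.Nodup := (PySem.Set.nodup_ofList xs).filter _
    have keysD : D.keys = L := by
      simp only [PySem.Dict.keys, ih]
      rw [List.map_map]
      exact List.map_id'' (fun _ => rfl) L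
    have nodupKeys : D.keys.Nodup := keysD ▸ nodupL
    have hcount : ∀ s, s ≠ x → ((xs ++ [x]).count s : Int) = (xs.count s : Int) := by
      intro s hs
      rw [List.count_append]
      simp [(Ne.symm hs)]
    have hofl := PySem.Set.ofList_append_singleton (xs := xs) (x := x)
    by_cases hhx : hit x = true
    · rw [if_pos hhx]
      by_cases hmx : x ∈ xs
      · -- x already present: insert overwrites in place
        have hxSx : x ∈ PySem.Set.ofList xs := (PySem.Set.mem_ofList _ _).mpr hmx
        have hadd : PySem.Set.add (PySem.Set.ofList xs) x = PySem.Set.ofList xs := by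
          simp [PySem.Set.add, PySem.Set.contains, hxSx]
        have hxL : x ∈ L := (memL x).mpr ⟨hmx, hhx⟩
        have hcont : D.contains x = true :=
          (PySem.Dict.contains_iff_mem_keys D x).mpr (keysD ▸ hxL)
        have hmemit : (x, (xs.count x : Int) * tot x) ∈ D.items := by
          rw [ih]; exact List.mem_map.mpr ⟨x, hxL, rfl⟩
        have hgetD : D.getD x 0 = (xs.count x : Int) * tot x :=
          PySem.Dict.getD_of_mem_items D hmemit nodupKeys 0
        rw [PySem.Dict.items_insert_of_contains D _ hcont, hgetD, ih, hofl, hadd, ← hL,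
          List.map_map]
        apply List.map_congr_left
        intro s hs
        by_cases hsx : s = x
        · have hb : (s == x) = true := by simp [hsx]
          simp only [Function.comp_apply, hb, if_pos]
          rw [hsx]
          have hc1 : ((xs ++ [x]).count x : Int) = (xs.count x : Int) + 1 := by
            rw [List.count_append]; simp
          rw [hc1]
          simp only [htot]
          ring_nf
        · have : (s == x) = false := by simp [hsx]
          simp only [Function.comp_apply, this, Bool.false_eq_true, if_false]
          rw [hcount s hsx]
      · -- fresh sentence: insert appends
        have hxSx : x ∉ PySem.Set.ofList xs := fun h => hmx ((PySem.Set.mem_ofList _ _).mp h)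
        have hadd : PySem.Set.add (PySem.Set.ofList xs) x = PySem.Set.ofList xs ++ [x] := by
          simp [PySem.Set.add, PySem.Set.contains, hxSx]
        have hxL : x ∉ L := fun h => hmx ((memL x).mp h).1
        have hcont : D.contains x = false := by
          have : x ∉ D.keys := keysD ▸ hxL
          cases hc : D.contains x with
          | false => rfl
          | true => exact absurd ((PySem.Dict.contains_iff_mem_keys D x).mp hc) this
        have hgetD : D.getD x 0 = 0 := PySem.Dict.getD_of_not_contains D 0 hcont
        rw [PySem.Dict.items_insert_of_not_contains D _ hcont, hgetD, ih, hofl, hadd,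
          List.filter_append, ← hL, List.map_append]
        congr 1
        · apply List.map_congr_left
          intro s hs
          rw [hcount s (fun h => hmx (h ▸ ((memL s).mp hs).1))]
        · have hc0 : xs.count x = 0 := List.count_eq_zero_of_not_mem hmx
          simp [hhx, hc0]
    · -- no word matches x: A leaves the dict unchanged
      rw [if_neg hhx, ih, hofl]
      have hfilt : (PySem.Set.add (PySem.Set.ofList xs) x).filter hit = L := by
        by_cases hxSx : x ∈ PySem.Set.ofList xs
        · simp [PySem.Set.add, PySem.Set.contains, hxSx, hL]
        · simp only [PySem.Set.add, PySem.Set.contains]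
          rw [if_neg (by simpa using hxSx), List.filter_append, ← hL]
          simp [hhx]
      rw [hfilt]
      apply List.map_congr_left
      intro s hs
      have hsx : s ≠ x := fun h => hhx (h ▸ ((memL s).mp hs).2)
      rw [hcount s hsx]

-- membership in a fold of Set.add
lemma mem_foldl_set_add {α β : Type} [BEq α] [LawfulBEq α] (f : β → α) (ys : List β)
    (g0 : PySem.Set α) (x : α) :
    x ∈ ys.foldl (fun g i => PySem.Set.add g (f i)) g0 ↔ x ∈ g0 ∨ ∃ i ∈ ys, x = f i := by
  induction ys generalizing g0 with
  | nil => simp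
  | cons y ys ih =>
    rw [List.foldl_cons, ih]
    simp [PySem.Set.mem_add]
    tauto

-- membership in B's gram index
lemma mem_grams (low : String) (Ls : List Int) (x : String) :
    x ∈ Ls.foldl (fun g L =>
        (PySem.List.pyRange 0 (PySem.Str.len low - L + 1) 1).foldl
          (fun g i => PySem.Set.add g (PySem.Str.slice low (some i) (some (i + L)))) g)
        PySem.Set.empty
      ↔ ∃ L ∈ Ls, ∃ i, i ∈ PySem.List.pyRange 0 (PySem.Str.len low - L + 1) 1 ∧
          x = PySem.Str.slice low (some i) (some (i + L)) := by
  have gen : ∀ (Ls : List Int) (g0 : PySem.Set String),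
      x ∈ Ls.foldl (fun g L =>
          (PySem.List.pyRange 0 (PySem.Str.len low - L + 1) 1).foldl
            (fun g i => PySem.Set.add g (PySem.Str.slice low (some i) (some (i + L)))) g) g0
        ↔ x ∈ g0 ∨ ∃ L ∈ Ls, ∃ i, i ∈ PySem.List.pyRange 0 (PySem.Str.len low - L + 1) 1 ∧
            x = PySem.Str.slice low (some i) (some (i + L)) := by
    intro Ls
    induction Ls with
    | nil => simp
    | cons L Ls ih =>
      intro g0
      rw [List.foldl_cons, ih, mem_foldl_set_add]
      constructor
      · rintro ((h | ⟨i, hi, hx⟩) | ⟨L', hL', i, hi, hx⟩)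
        · exact Or.inl h
        · exact Or.inr ⟨L, List.mem_cons_self, i, hi, hx⟩
        · exact Or.inr ⟨L', List.mem_cons_of_mem _ hL', i, hi, hx⟩
      · rintro (h | ⟨L', hL', i, hi, hx⟩)
        · exact Or.inl (Or.inl h)
        · rw [List.mem_cons] at hL'
          rcases hL' with rfl | hL'
          · exact Or.inl (Or.inr ⟨i, hi, hx⟩)
          · exact Or.inr ⟨L', hL', i, hi, hx⟩
  rw [gen]
  simp [PySem.Set.empty]

-- for a word of a length present in Ls, gram membership is exactly substring occurrence
lemma grams_contains_iff (low : String) (Ls : List Int) (word : String)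
    (hL : (word.length : Int) ∈ Ls) (hpos : ∀ L ∈ Ls, 0 ≤ L) :
    (∃ L ∈ Ls, ∃ i, i ∈ PySem.List.pyRange 0 (PySem.Str.len low - L + 1) 1 ∧
        word = PySem.Str.slice low (some i) (some (i + L)))
      ↔ PySem.Str.isIn word low = true := by
  constructor
  · rintro ⟨L, hLmem, i, hi, rfl⟩
    have h0L := hpos L hLmem
    rw [PySem.List.mem_pyRange_one] at hi
    rw [PySem.Str.isIn_iff_infix]
    simp only [PySem.Str.toList_slice, PySem.Chars.slice_eq_listSlice]
    rw [PySem.List.slice_toNat _ hi.1 (by omega)]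
    exact ((List.take_prefix _ _).isInfix).trans ((List.drop_suffix _ _).isInfix)
  · intro hin
    rw [PySem.Str.isIn_iff_infix] at hin
    obtain ⟨spre, t, hsplit⟩ := hin
    have hlenlow : low.toList.length = spre.length + word.toList.length + t.length := by
      rw [← hsplit]; simp; omega
    have hlw : word.toList.length = word.length := by
      simp
    refine ⟨(word.length : Int), hL, (spre.length : Int), ?_, ?_⟩
    · rw [PySem.List.mem_pyRange_one]
      have hlen : PySem.Str.len low = (low.toList.length : Int) := by simp
      constructor
      · exact_mod_cast Nat.zero_le _
      · rw [hlen]; omega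
    · have htl : (PySem.Str.slice low (some (spre.length : Int))
          (some ((spre.length : Int) + (word.length : Int)))).toList = word.toList := by
        simp only [PySem.Str.toList_slice, PySem.Chars.slice_eq_listSlice]
        rw [PySem.List.slice_toNat _ (by positivity) (by positivity)]
        have h1 : ((spre.length : Int) + (word.length : Int)).toNat
            - ((spre.length : Int)).toNat = word.length := by omega
        rw [h1, ← hsplit, ← hlw]
        simp
      exact (String.toList_inj.mp htl).symm

-- B's inner scoring loop over the gram index computes (total, hit)
lemma innerB_eq (g : PySem.Set String) (low : String) (ws : List (String × Int))
    (t0 : Int) (h0 : Bool)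
    (hc : ∀ wf ∈ ws, PySem.Set.contains g wf.1 = PySem.Str.isIn wf.1 low) :
    ws.foldl (fun (p : Int × Bool) wf =>
        if PySem.Set.contains g wf.1 then (p.1 + wf.2, true) else p) (t0, h0)
      = (t0 + pvTot low ws, h0 || pvHit low ws) := by
  induction ws generalizing t0 h0 with
  | nil => simp [pvTot, pvHit]
  | cons wf rest ih =>
    rw [List.foldl_cons, hc wf List.mem_cons_self]
    have ihc : ∀ wf ∈ rest, PySem.Set.contains g wf.1 = PySem.Str.isIn wf.1 low :=
      fun w hw => hc w (List.mem_cons_of_mem _ hw)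
    by_cases h : PySem.Str.isIn wf.1 low
    · rw [if_pos h, ih _ _ ihc]
      simp only [pvTot, pvHit, h, if_pos, Bool.true_or, Bool.or_true]
      rw [add_assoc]
    · rw [if_neg h, ih _ _ ihc]
      simp only [pvTot, pvHit, Bool.not_eq_true] at h ⊢
      rw [h]
      simp

-- a fold that conditionally inserts is a fold over the filtered list
lemma foldl_if_insert_filter (p : String → Bool) (v : String → Int) (xs : List String)
    (d0 : PySem.Dict String Int) :
    xs.foldl (fun d s => if p s then d.insert s (v s) else d) d0
      = (xs.filter p).foldl (fun d s => d.insert s (v s)) d0 := by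
  induction xs generalizing d0 with
  | nil => rfl
  | cons x xs ih =>
    rw [List.foldl_cons]
    by_cases h : p x
    · rw [if_pos h, List.filter_cons_of_pos h, List.foldl_cons, ih]
    · rw [if_neg h, List.filter_cons_of_neg h, ih]

-- a fold of inserts with fresh distinct keys, from any dict avoiding them, appends its pairs
lemma foldl_insert_items (v : String → Int) (l : List String) (d : PySem.Dict String Int)
    (hnd : l.Nodup) (hfresh : ∀ s ∈ l, d.contains s = false) :
    (l.foldl (fun d s => d.insert s (v s)) d).items = d.items ++ l.map (fun s => (s, v s)) := by
  induction l generalizing d with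
  | nil => simp
  | cons x l ih =>
    have hfresh' : ∀ s ∈ l, (d.insert x (v x)).contains s = false := by
      intro s hs
      rw [PySem.Dict.contains_insert]
      have hne : (s == x) = false := by
        simp only [beq_eq_false_iff_ne, ne_eq]
        exact fun h => (List.nodup_cons.mp hnd).1 (h ▸ hs)
      rw [hne, hfresh s (List.mem_cons_of_mem _ hs)]
      rfl
    rw [List.foldl_cons, ih _ ((List.nodup_cons.mp hnd).2) hfresh',
      PySem.Dict.items_insert_of_not_contains d _ (hfresh x List.mem_cons_self)]
    simp

-- A's whole computation, in closed form
lemma A_closed (sents : List String) (freq : List (String × Int)) :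
    sentence_rank sents freq
      = ((PySem.Set.ofList sents).filter (fun s => pvHit (PySem.Str.lower s) freq)).map
          (fun s => (s, (sents.count s : Int) * pvTot (PySem.Str.lower s) freq)) := by
  unfold sentence_rank
  have hA : (fun (rank : PySem.Dict String Int) (s : String) =>
        freq.foldl (fun rank wf =>
          if PySem.Str.isIn wf.1 (PySem.Str.lower s) then
            if rank.contains s then rank.modify s 0 (· + wf.2)
            else rank.insert s wf.2
          else rank) rank)
      = fun rank s =>
          if pvHit (PySem.Str.lower s) freq then
            rank.insert s (rank.getD s 0 + pvTot (PySem.Str.lower s) freq)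
          else rank := by
    funext rank s
    exact innerA_eq s freq rank
  rw [hA, foldA_items]

-- B's whole computation, in closed form
lemma B_closed (sents : List String) (freq : List (String × Int)) :
    sentence_rank_alt sents freq
      = ((PySem.Set.ofList sents).filter (fun s => pvHit (PySem.Str.lower s) freq)).map
          (fun s => (s, pvTot (PySem.Str.lower s) freq * (sents.count s : Int))) := by
  unfold sentence_rank_alt
  simp only []
  rw [PySem.Dict.foldl_insert_getD_add_one_eq_counter, PySem.Dict.keys_counter]
  have hB : (fun (rank : PySem.Dict String Int) (s : String) =>
        let low := PySem.Str.lower s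
        let grams : PySem.Set String :=
          (PySem.Set.ofList (freq.map (fun wf => PySem.Str.len wf.1))).foldl (fun g L =>
            (PySem.List.pyRange 0 (PySem.Str.len low - L + 1) 1).foldl
              (fun g i => PySem.Set.add g (PySem.Str.slice low (some i) (some (i + L)))) g)
            PySem.Set.empty
        let th := freq.foldl (fun (p : Int × Bool) wf =>
          if PySem.Set.contains grams wf.1 then (p.1 + wf.2, true) else p) (0, false)
        if th.2 then rank.insert s (th.1 * (PySem.Dict.counter sents).getD s 0) else rank)
      = fun rank s =>
          if pvHit (PySem.Str.lower s) freq then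
            rank.insert s (pvTot (PySem.Str.lower s) freq * (sents.count s : Int))
          else rank := by
    funext rank s
    simp only []
    set low := PySem.Str.lower s with hlow
    set Ls := freq.map (fun wf => PySem.Str.len wf.1) with hLs
    set grams : PySem.Set String :=
      (PySem.Set.ofList Ls).foldl (fun g L =>
        (PySem.List.pyRange 0 (PySem.Str.len low - L + 1) 1).foldl
          (fun g i => PySem.Set.add g (PySem.Str.slice low (some i) (some (i + L)))) g)
        PySem.Set.empty with hgrams
    have hpos : ∀ L ∈ PySem.Set.ofList Ls, 0 ≤ L := by
      intro L hLm
      rw [PySem.Set.mem_ofList] at hLm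
      obtain ⟨wf, _, rfl⟩ := List.mem_map.mp hLm
      simp
    have hcont : ∀ wf ∈ freq, PySem.Set.contains grams wf.1 = PySem.Str.isIn wf.1 low := by
      intro wf hwf
      have hLmem : ((wf.1.length : Int)) ∈ PySem.Set.ofList Ls :=
        (PySem.Set.mem_ofList _ _).mpr (List.mem_map.mpr ⟨wf, hwf, by simp⟩)
      rw [Bool.eq_iff_iff]
      have hmemiff : PySem.Set.contains grams wf.1 = true ↔ wf.1 ∈ grams := by
        simp [PySem.Set.contains]
      rw [hmemiff, hgrams, mem_grams]
      exact grams_contains_iff low (PySem.Set.ofList Ls) wf.1 hLmem hpos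
    rw [innerB_eq grams low freq 0 false hcont]
    simp only [Bool.false_or, zero_add]
    rw [PySem.Dict.getD_counter]
  rw [hB, foldl_if_insert_filter, foldl_insert_items _ _ _
      ((PySem.Set.nodup_ofList sents).filter _)
      (fun a _ => PySem.Dict.contains_empty a)]
  simp [PySem.Dict.empty]

-- ===== VERDICT (by name: the statement is the Claim_ definition above) =====
theorem sentence_rank_spec : Claim_equal_sentence_rank := by
  intro sents freq _
  unfold Spec_sentence_rank
  rw [A_closed, B_closed]
  apply List.map_congr_left
  intro s _
  rw [mul_comm]
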